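-- pv_equiv track=rewrite | github.com/ernie02212/Ics33-repo | q1helper/q1solution.py | by_skill
-- ===== SOURCE A (Python) =====
-- from collections import defaultdict  # Use or ignore
--
-- def by_skill(db1 : {str:{str:int}}) -> [int,[str,[str]]]:
--     result = defaultdict(lambda : defaultdict(list))
--     for name, jobs in db1.items():
--         for job, rank in jobs.items():
--             result[rank][job].append(name)
--     for rank, info in result.items():
--         lst = []
--         result[rank] = lst
--         for job, ppl in sorted(info.items()):
--             lst.append((job, sorted(ppl)))
--     return sorted(result.items(), reverse = True)
-- ===== SOURCE B (Python) =====
-- def by_skill(db1 : {str:{str:int}}) -> [int,[str,[str]]]: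
--     # one flat sort of (rank, job, name) triples, then a linear scan that
--     # splits maximal runs: first by rank, then by job inside each rank run
--     triples = sorted(((rank, job, name)
--                       for name, jobs in db1.items()
--                       for job, rank in jobs.items()),
--                      key=lambda t: (-t[0], t[1], t[2]))
--     out = []
--     i, n = 0, len(triples)
--     while i < n:
--         r = triples[i][0]
--         jobs = []
--         while i < n and triples[i][0] == r:
--             j = triples[i][1]
--             names = []
--             while i < n and triples[i][0] == r and triples[i][1] == j:
--                 names.append(triples[i][2])
--                 i += 1
--             jobs.append((j, names))
--         out.append((r, jobs))
--     return out
-- ===== Notes on version B (the rewrite author's own statement) =====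
-- stated objective: alternative
-- what changed: Replaces A's nested defaultdict grouping plus per-group sorts with one flat sort of (rank, job, name) triples by key (-rank, job, name) followed by a recursive run-splitting scan (groupby-style) that rebuilds the nested output without any dictionary.
import Mathlib
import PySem

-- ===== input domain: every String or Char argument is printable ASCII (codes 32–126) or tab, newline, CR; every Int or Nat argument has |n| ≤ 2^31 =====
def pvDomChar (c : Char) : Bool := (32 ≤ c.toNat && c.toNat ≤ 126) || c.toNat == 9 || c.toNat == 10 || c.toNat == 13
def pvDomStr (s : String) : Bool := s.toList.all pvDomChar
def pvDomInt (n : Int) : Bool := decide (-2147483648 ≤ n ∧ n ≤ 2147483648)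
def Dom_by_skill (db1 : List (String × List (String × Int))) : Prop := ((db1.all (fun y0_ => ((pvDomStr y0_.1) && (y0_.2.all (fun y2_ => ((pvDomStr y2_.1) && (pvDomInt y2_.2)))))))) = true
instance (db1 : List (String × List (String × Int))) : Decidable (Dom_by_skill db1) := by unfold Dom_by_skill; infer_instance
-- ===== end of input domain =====

-- B replaces A's nested defaultdict grouping (plus per-group sorts) by one flat sort of
-- (rank, job, name) triples followed by a recursive run-splitting scan; objective: alternative.


-- ===== PORT A =====
-- Python A's two `sorted(...)` calls on lists of pairs compare tuples lexicographically; they are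
-- ported as stable sorts keyed on the first component, exact here because the first components
-- (dict keys) are distinct, so comparison never reaches the second component.
def by_skill (db1 : List (String × List (String × Int))) : List (Int × (List (String × List String))) :=
  -- result = defaultdict(lambda: defaultdict(list)); result[rank][job].append(name)
  let result : PySem.Dict Int (PySem.Dict String (List String)) :=
    db1.foldl (fun acc p =>
      p.2.foldl (fun acc q =>
        acc.modify q.2 PySem.Dict.empty (fun inn => inn.modify q.1 [] (fun l => l ++ [p.1]))) acc)
      PySem.Dict.empty
  -- for rank, info in result.items(): result[rank] = [(job, sorted(ppl)) for job, ppl in sorted(info.items())]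
  let result2 : List (Int × (List (String × List String))) :=
    result.items.map (fun ri =>
      (ri.1, (PySem.List.sorted ri.2.items (fun jp => jp.1)).map
               (fun jp => (jp.1, PySem.List.sorted jp.2 (fun s => s)))))
  -- return sorted(result.items(), reverse=True)
  PySem.List.sorted result2 (fun rp => rp.1) true

-- ===== PORT B =====
-- the sort key (-t[0], t[1], t[2]); Python compares tuples lexicographically, ported via ×ₗ
def pvKey (t : Int × String × String) : Int ×ₗ (String ×ₗ String) :=
  toLex (-t.1, toLex (t.2.1, t.2.2))

-- the inner while loop: split a maximal run of one job, recurse on the rest (the run scan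
-- 'while i < n and ...' is the takeWhile/dropWhile split; it is only applied to one rank's run,
-- where the loop's 'triples[i][0] == r' conjunct is constantly true)
def pvGroupJobs : List (Int × String × String) → List (String × List String)
  | [] => []
  | t :: ts =>
    (t.2.1, ((t :: ts).takeWhile (fun u => u.2.1 == t.2.1)).map (fun u => u.2.2))
      :: pvGroupJobs ((t :: ts).dropWhile (fun u => u.2.1 == t.2.1))
  termination_by l => l.length
  decreasing_by
    simp only [List.dropWhile_cons, beq_self_eq_true, if_true, List.length_cons]
    exact Nat.lt_succ_of_le (List.length_dropWhile_le _ _)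

-- the outer while loop: split a maximal run of one rank, group its jobs, recurse on the rest
def pvGroupRanks : List (Int × String × String) → List (Int × (List (String × List String)))
  | [] => []
  | t :: ts =>
    (t.1, pvGroupJobs ((t :: ts).takeWhile (fun u => u.1 == t.1)))
      :: pvGroupRanks ((t :: ts).dropWhile (fun u => u.1 == t.1))
  termination_by l => l.length
  decreasing_by
    simp only [List.dropWhile_cons, beq_self_eq_true, if_true, List.length_cons]
    exact Nat.lt_succ_of_le (List.length_dropWhile_le _ _)

def by_skill_alt (db1 : List (String × List (String × Int))) : List (Int × (List (String × List String))) :=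
  pvGroupRanks (PySem.List.sorted
    (db1.flatMap (fun p => p.2.map (fun q => (q.2, q.1, p.1)))) pvKey)

-- ===== PRECONDITION & SPEC =====
-- Pre_ excludes association lists with a duplicate person name, or a duplicate job name inside one
-- person, because such lists do not represent the Python dict-of-dicts argument faithfully (Python's
-- dict silently collapses duplicate keys before A ever runs).
def Pre_by_skill (db1 : List (String × List (String × Int))) : Prop :=
  (db1.map Prod.fst).Nodup ∧ ∀ p ∈ db1, (p.2.map Prod.fst).Nodup
instance (db1 : List (String × List (String × Int))) : Decidable (Pre_by_skill db1) := by
  unfold Pre_by_skill; infer_instance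
def pvWitness_by_skill : (List (String × List (String × Int))) :=
  [("ann", [("dev", 2), ("qa", 1)]), ("bob", [("dev", 2)])]
def Spec_by_skill (db1 : List (String × List (String × Int))) (out : List (Int × (List (String × List String)))) : Prop := out = by_skill_alt db1
instance (db1 : List (String × List (String × Int))) (out : List (Int × (List (String × List String)))) : Decidable (Spec_by_skill db1 out) := by unfold Spec_by_skill; infer_instance

-- ===== CLAIM (what is proved, stated in full; the proofs are below) =====
def Claim_equal_by_skill : Prop := ∀ (db1 : List (String × List (String × Int))), Dom_by_skill db1 → Pre_by_skill db1 → Spec_by_skill db1 (by_skill db1)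

-- ===== LEMMAS AND PROOFS =====

-- the flattened (rank, job, name) triples, and the canonical nested output both ports compute
def pvTs (db1 : List (String × List (String × Int))) : List (Int × String × String) :=
  db1.flatMap (fun p => p.2.map (fun q => (q.2, q.1, p.1)))
def pvR (ts : List (Int × String × String)) : List Int :=
  PySem.List.sorted (PySem.Set.ofList (ts.map (fun t => t.1))) (fun x => x) true
def pvJ (ts : List (Int × String × String)) (r : Int) : List String :=
  PySem.List.sorted (PySem.Set.ofList ((ts.filter (fun t => t.1 == r)).map (fun t => t.2.1))) (fun x => x)
def pvN (ts : List (Int × String × String)) (r : Int) (j : String) : List String :=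
  PySem.List.sorted (((ts.filter (fun t => t.1 == r)).filter (fun t => t.2.1 == j)).map (fun t => t.2.2)) (fun s => s)
def pvCanon (ts : List (Int × String × String)) : List (Int × (List (String × List String))) :=
  (pvR ts).map (fun r => (r, (pvJ ts r).map (fun j => (j, pvN ts r j))))
def pvBlock (ts : List (Int × String × String)) (r : Int) : List (Int × String × String) :=
  (pvJ ts r).flatMap (fun j => (pvN ts r j).map (fun n => (r, j, n)))
def pvFlat (ts : List (Int × String × String)) : List (Int × String × String) :=
  (pvR ts).flatMap (fun r => pvBlock ts r)

-- membership characterizations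
lemma pv_mem_R (ts : List (Int × String × String)) (r : Int) :
    r ∈ pvR ts ↔ ∃ t ∈ ts, t.1 = r := by
  simp [pvR, PySem.List.mem_sorted, PySem.Set.mem_ofList, List.mem_map]
lemma pv_mem_J (ts : List (Int × String × String)) (r : Int) (j : String) :
    j ∈ pvJ ts r ↔ ∃ t ∈ ts, t.1 = r ∧ t.2.1 = j := by
  simp [pvJ, PySem.List.mem_sorted, PySem.Set.mem_ofList, List.mem_map, List.mem_filter,
    and_assoc]
lemma pv_mem_N (ts : List (Int × String × String)) (r : Int) (j : String) (n : String) :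
    n ∈ pvN ts r j ↔ (r, j, n) ∈ ts := by
  simp only [pvN, PySem.List.mem_sorted, List.mem_map, List.mem_filter, beq_iff_eq]
  constructor
  · rintro ⟨⟨a, b, c⟩, ⟨⟨ht, h1⟩, h2⟩, h3⟩
    simp only at h1 h2 h3
    subst h1; subst h2; subst h3; exact ht
  · intro h
    exact ⟨(r, j, n), ⟨⟨h, rfl⟩, rfl⟩, rfl⟩

-- ===== A-side =====
-- the one step of A's building loop, over a flattened (rank, job, name) triple
def pvStep (acc : PySem.Dict Int (PySem.Dict String (List String))) (t : Int × String × String) :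
    PySem.Dict Int (PySem.Dict String (List String)) :=
  acc.modify t.1 PySem.Dict.empty (fun inn => inn.modify t.2.1 [] (fun l => l ++ [t.2.2]))

-- A's double loop over db1 is the single loop over the flattened triples
lemma pv_build_eq_foldl_triples (db1 : List (String × List (String × Int))) :
    db1.foldl (fun acc p =>
      p.2.foldl (fun acc q =>
        acc.modify q.2 PySem.Dict.empty (fun inn => inn.modify q.1 [] (fun l => l ++ [p.1]))) acc)
      PySem.Dict.empty
    = (pvTs db1).foldl pvStep PySem.Dict.empty := by
  rw [pvTs, List.foldl_flatMap]
  simp [List.foldl_map, pvStep]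

-- looking one rank up in the outer fold selects the triples of that rank
lemma pv_getD_foldl_step (ts : List (Int × String × String))
    (d : PySem.Dict Int (PySem.Dict String (List String))) (r : Int) :
    (ts.foldl pvStep d).getD r PySem.Dict.empty
    = (ts.filter (fun t => t.1 == r)).foldl
        (fun inn t => inn.modify t.2.1 [] (fun l => l ++ [t.2.2]))
        (d.getD r PySem.Dict.empty) := by
  induction ts generalizing d with
  | nil => rfl
  | cons t ts ih =>
    by_cases h : t.1 = r
    · subst h
      simp only [List.foldl_cons, List.filter_cons, BEq.rfl, ih]
      rw [pvStep, PySem.Dict.getD_modify_self]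
      rfl
    · have hb : (t.1 == r) = false := by simp [h]
      simp only [List.foldl_cons, List.filter_cons, hb, Bool.false_eq_true, if_false, ih]
      rw [pvStep, PySem.Dict.getD_modify_of_ne _ _ _ (Ne.symm h)]

-- sorting pairs (k, h k) over Nodup keys by first component = sorting the keys, then pairing
lemma pv_sorted_map_pair {κ ν : Type} [LinearOrder κ]
    (l : List κ) (h : κ → ν) (hnd : l.Nodup) :
    PySem.List.sorted (l.map (fun k => (k, h k))) (fun p => p.1)
    = (PySem.List.sorted l (fun x => x)).map (fun k => (k, h k)) := by
  apply PySem.List.sorted_eq_of_perm_of_pairwise_lt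
  · exact (PySem.List.sorted_perm l (fun x => x) false).map _
  · rw [List.pairwise_map]
    have hle := PySem.List.sorted_pairwise l (fun x => x)
    have hne : (PySem.List.sorted l (fun x => x)).Nodup :=
      ((PySem.List.sorted_perm l (fun x => x) false).nodup_iff).2 hnd
    exact (hle.and hne).imp (fun hab => lt_of_le_of_ne hab.1 hab.2)

-- the reverse=True twin
lemma pv_sorted_rev_map_pair {κ ν : Type} [LinearOrder κ]
    (l : List κ) (h : κ → ν) (hnd : l.Nodup) :
    PySem.List.sorted (l.map (fun k => (k, h k))) (fun p => p.1) true
    = (PySem.List.sorted l (fun x => x) true).map (fun k => (k, h k)) := by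
  apply PySem.List.sorted_rev_eq_of_perm_of_pairwise_gt
  · exact (PySem.List.sorted_perm l (fun x => x) true).map _
  · rw [List.pairwise_map]
    have hle := PySem.List.sorted_pairwise_rev l (fun x => x)
    have hne : (PySem.List.sorted l (fun x => x) true).Nodup :=
      ((PySem.List.sorted_perm l (fun x => x) true).nodup_iff).2 hnd
    exact (hle.and hne).imp (fun hab => lt_of_le_of_ne hab.1 (Ne.symm hab.2))

-- A computes the canonical nested output
lemma pv_A_canon (db1 : List (String × List (String × Int))) :
    by_skill db1 = pvCanon (pvTs db1) := by
  unfold by_skill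
  dsimp only
  rw [pv_build_eq_foldl_triples]
  set ts := pvTs db1 with hts
  -- keys of the outer dict: the distinct ranks in first-occurrence order
  have hK : (ts.foldl pvStep PySem.Dict.empty).keys
      = PySem.Set.ofList (ts.map (fun t => t.1)) :=
    PySem.Dict.keys_foldl_modify_key ts (fun t => t.1) PySem.Dict.empty
      (fun _ t inn => inn.modify t.2.1 [] (fun l => l ++ [t.2.2])) PySem.Dict.empty
  have hKnd : (ts.foldl pvStep PySem.Dict.empty).keys.Nodup :=
    PySem.Dict.nodup_keys_foldl_modify_key ts (fun t => t.1) PySem.Dict.empty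
      (fun _ t inn => inn.modify t.2.1 [] (fun l => l ++ [t.2.2])) PySem.Dict.empty List.nodup_nil
  have hitems : (ts.foldl pvStep PySem.Dict.empty).items
      = (PySem.Set.ofList (ts.map (fun t => t.1))).map
          (fun r => (r, (ts.foldl pvStep PySem.Dict.empty).getD r PySem.Dict.empty)) := by
    rw [← hK]; exact PySem.Dict.items_eq_map_keys _ hKnd _
  -- the inner dict of a rank r, as a fold over (job, name) pairs of that rank
  have hgetD : ∀ r : Int, (ts.foldl pvStep PySem.Dict.empty).getD r PySem.Dict.empty
      = ((ts.filter (fun t => t.1 == r)).map (fun t => (t.2.1, t.2.2))).foldl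
          (fun d p => d.modify p.1 [] (fun l => l ++ [p.2])) PySem.Dict.empty := by
    intro r
    rw [pv_getD_foldl_step, List.foldl_map]; rfl
  -- characterize each inner dict's items
  have hinner : ∀ (l : List (String × String)),
      (l.foldl (fun d p => d.modify p.1 [] (fun l => l ++ [p.2])) PySem.Dict.empty).items
      = (PySem.Set.ofList (l.map (fun p => p.1))).map
          (fun j => (j, (l.filter (fun p => p.1 == j)).map (fun p => p.2))) := by
    intro l
    have hknd : (l.foldl (fun d p => d.modify p.1 [] (fun l => l ++ [p.2])) PySem.Dict.empty).keys.Nodup :=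
      PySem.Dict.nodup_keys_foldl_modify_key l (fun p => p.1) []
        (fun _ p v => v ++ [p.2]) PySem.Dict.empty List.nodup_nil
    have hk : (l.foldl (fun d p => d.modify p.1 [] (fun l => l ++ [p.2])) PySem.Dict.empty).keys
        = PySem.Set.ofList (l.map (fun p => p.1)) :=
      PySem.Dict.keys_foldl_modify_key l (fun p => p.1) []
        (fun _ p v => v ++ [p.2]) PySem.Dict.empty
    rw [PySem.Dict.items_eq_map_keys _ hknd [], hk]
    refine List.map_congr_left (fun j _ => ?_)
    rw [PySem.Dict.getD_foldl_modify_append]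
    rfl
  have hbody : ∀ r ∈ PySem.Set.ofList (ts.map (fun t => t.1)),
      ((fun ri : Int × PySem.Dict String (List String) =>
          (ri.1, (PySem.List.sorted ri.2.items (fun jp => jp.1)).map
                   (fun jp => (jp.1, PySem.List.sorted jp.2 (fun s => s))))) ∘
        (fun r => (r, (ts.foldl pvStep PySem.Dict.empty).getD r PySem.Dict.empty))) r
      = (r, (pvJ ts r).map (fun j => (j, pvN ts r j))) := by
    intro r _
    simp only [Function.comp_apply, hgetD r, hinner, pvJ, pvN]
    rw [pv_sorted_map_pair _ _ (PySem.Set.nodup_ofList _), List.map_map]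
    simp only [List.map_map, List.filter_map, List.filter_filter, Function.comp_def,
      Bool.and_comm]
  rw [hitems, List.map_map, List.map_congr_left hbody,
    pv_sorted_rev_map_pair _ _ (PySem.Set.nodup_ofList (ts.map (fun t => t.1)))]
  rfl

-- ===== B-side =====
-- under Pre_, the (name, job) pairs of the triples are distinct
lemma pv_key_nodup (db1 : List (String × List (String × Int))) (hpre : Pre_by_skill db1) :
    ((pvTs db1).map (fun t => (t.2.2, t.2.1))).Nodup := by
  suffices H : ∀ (l : List (String × List (String × Int))), (l.map Prod.fst).Nodup →
      (∀ p ∈ l, (p.2.map Prod.fst).Nodup) →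
      ((pvTs l).map (fun t => (t.2.2, t.2.1))).Nodup from H db1 hpre.1 hpre.2
  intro l
  induction l with
  | nil => intro _ _; simp [pvTs]
  | cons p rest ih =>
    intro h1 h2
    simp only [List.map_cons, List.nodup_cons] at h1
    have ihres := ih h1.2 (fun q hq => h2 q (List.mem_cons_of_mem _ hq))
    simp only [pvTs, List.flatMap_cons, List.map_append, List.map_map] at *
    rw [List.nodup_append]
    refine ⟨?_, ihres, ?_⟩
    · have heq : p.2.map ((fun t : Int × String × String => (t.2.2, t.2.1)) ∘
          (fun q : String × Int => (q.2, q.1, p.1)))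
          = (p.2.map Prod.fst).map (fun j => (p.1, j)) := by
        simp [List.map_map, Function.comp_def]
      rw [heq]
      exact (h2 p (List.mem_cons_self)).map (fun a b hab => by simpa using hab)
    · intro a ha b hb
      simp only [List.mem_map, Function.comp_apply] at ha hb
      obtain ⟨q, _, rfl⟩ := ha
      obtain ⟨t, ht2, rfl⟩ := hb
      obtain ⟨p', hp', ht3⟩ := List.mem_flatMap.mp ht2
      obtain ⟨q', _, rfl⟩ := List.mem_map.mp ht3
      intro heq
      exact h1.1 (List.mem_map.mpr ⟨p', hp', by simpa using (congrArg Prod.fst heq).symm⟩)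

-- unfolding the lexicographic sort key
lemma pv_key_lt (a b : Int × String × String) :
    pvKey a < pvKey b ↔
      (-a.1 < -b.1 ∨ (-a.1 = -b.1 ∧ (a.2.1 < b.2.1 ∨ (a.2.1 = b.2.1 ∧ a.2.2 < b.2.2)))) := by
  simp [pvKey, Prod.Lex.toLex_lt_toLex]

-- the names of one (rank, job) group are distinct
lemma pv_N_nodup (ts : List (Int × String × String)) (r : Int) (j : String)
    (hnd : (ts.map (fun t => (t.2.2, t.2.1))).Nodup) : (pvN ts r j).Nodup := by
  have hsub : ((ts.filter (fun t => t.1 == r)).filter (fun t => t.2.1 == j)).Sublist ts :=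
    List.filter_sublist.trans List.filter_sublist
  have hl := hnd.sublist (hsub.map (fun t => (t.2.2, t.2.1)))
  rw [List.Nodup, List.pairwise_map] at hl
  refine ((PySem.List.sorted_perm _ _ false).nodup_iff).2 ?_
  rw [List.Nodup, List.pairwise_map]
  refine List.Pairwise.imp_of_mem ?_ hl
  intro a b ha hb hne heq
  have ha2 : a.2.1 = j := by simpa using (List.mem_filter.mp ha).2
  have hb2 : b.2.1 = j := by simpa using (List.mem_filter.mp hb).2
  exact hne (by rw [heq, ha2, hb2])

-- the sorted name / job / rank lists are strictly ordered
lemma pv_N_pairwise (ts : List (Int × String × String)) (r : Int) (j : String)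
    (hnd : (ts.map (fun t => (t.2.2, t.2.1))).Nodup) : (pvN ts r j).Pairwise (· < ·) := by
  have hle := PySem.List.sorted_pairwise
    (((ts.filter (fun t => t.1 == r)).filter (fun t => t.2.1 == j)).map (fun t => t.2.2)) (fun s => s)
  exact ((hle.and (pv_N_nodup ts r j hnd)).imp (fun hab => lt_of_le_of_ne hab.1 hab.2))

lemma pv_J_pairwise (ts : List (Int × String × String)) (r : Int) :
    (pvJ ts r).Pairwise (· < ·) :=
  PySem.List.sorted_ofList_pairwise_lt _

lemma pv_R_pairwise (ts : List (Int × String × String)) :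
    (pvR ts).Pairwise (fun a b => b < a) := by
  have hle := PySem.List.sorted_pairwise_rev (PySem.Set.ofList (ts.map (fun t => t.1))) (fun x => x)
  have hndR : (pvR ts).Nodup :=
    ((PySem.List.sorted_perm _ _ true).nodup_iff).2 (PySem.Set.nodup_ofList _)
  exact ((hle.and hndR).imp (fun hab => lt_of_le_of_ne hab.1 (Ne.symm hab.2)))

-- elements of a rank block carry that rank, a job of pvJ and a name of pvN
lemma pv_mem_block (ts : List (Int × String × String)) (r : Int)
    (a : Int × String × String) (ha : a ∈ pvBlock ts r) :
    ∃ j ∈ pvJ ts r, ∃ n ∈ pvN ts r j, a = (r, j, n) := by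
  simp only [pvBlock, List.mem_flatMap, List.mem_map] at ha
  obtain ⟨j, hj, n, hn, rfl⟩ := ha
  exact ⟨j, hj, n, hn, rfl⟩

-- the flattened canonical output is strictly increasing under the sort key
lemma pv_flat_pairwise (ts : List (Int × String × String))
    (hnd : (ts.map (fun t => (t.2.2, t.2.1))).Nodup) :
    (pvFlat ts).Pairwise (fun a b => pvKey a < pvKey b) := by
  have hflat : pvFlat ts = ((pvR ts).map (fun r => pvBlock ts r)).flatten := by
    simp [pvFlat, List.flatMap_def]
  rw [hflat, List.pairwise_flatten]
  constructor
  · intro l hl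
    obtain ⟨r, _, rfl⟩ := List.mem_map.mp hl
    have hblk : pvBlock ts r = ((pvJ ts r).map (fun j => (pvN ts r j).map (fun n => (r, j, n)))).flatten := by
      simp [pvBlock, List.flatMap_def]
    rw [hblk, List.pairwise_flatten]
    constructor
    · intro m hm
      obtain ⟨j, _, rfl⟩ := List.mem_map.mp hm
      rw [List.pairwise_map]
      refine (pv_N_pairwise ts r j hnd).imp ?_
      intro n₁ n₂ h
      rw [pv_key_lt]
      exact Or.inr ⟨rfl, Or.inr ⟨rfl, h⟩⟩
    · rw [List.pairwise_map]
      refine (pv_J_pairwise ts r).imp ?_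
      intro j₁ j₂ hj a ha b hb
      obtain ⟨n₁, _, rfl⟩ := List.mem_map.mp ha
      obtain ⟨n₂, _, rfl⟩ := List.mem_map.mp hb
      rw [pv_key_lt]
      exact Or.inr ⟨rfl, Or.inl hj⟩
  · rw [List.pairwise_map]
    refine (pv_R_pairwise ts).imp ?_
    intro r₁ r₂ hr a ha b hb
    obtain ⟨j₁, _, n₁, _, rfl⟩ := pv_mem_block ts r₁ a ha
    obtain ⟨j₂, _, n₂, _, rfl⟩ := pv_mem_block ts r₂ b hb
    rw [pv_key_lt]
    exact Or.inl (by simpa using hr)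

-- nonemptiness of the groups
lemma pv_N_ne_nil (ts : List (Int × String × String)) (r : Int) (j : String)
    (hj : j ∈ pvJ ts r) : pvN ts r j ≠ [] := by
  obtain ⟨t, ht, h1, h2⟩ := (pv_mem_J ts r j).mp hj
  refine List.ne_nil_of_mem ((pv_mem_N ts r j t.2.2).mpr ?_)
  rw [← h1, ← h2]
  exact ht

lemma pv_block_ne_nil (ts : List (Int × String × String)) (r : Int)
    (hr : r ∈ pvR ts) : pvBlock ts r ≠ [] := by
  obtain ⟨t, ht, h1⟩ := (pv_mem_R ts r).mp hr
  have hj : t.2.1 ∈ pvJ ts r := (pv_mem_J ts r t.2.1).mpr ⟨t, ht, h1, rfl⟩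
  have hn : t.2.2 ∈ pvN ts r t.2.1 := by
    refine (pv_mem_N ts r t.2.1 t.2.2).mpr ?_
    rw [← h1]
    exact ht
  exact List.ne_nil_of_mem (List.mem_flatMap.mpr ⟨t.2.1, hj, List.mem_map.mpr ⟨t.2.2, hn, rfl⟩⟩)

-- the flattened canonical output is a permutation of the triples
lemma pv_flat_perm (ts : List (Int × String × String))
    (hnd : (ts.map (fun t => (t.2.2, t.2.1))).Nodup) :
    (pvFlat ts).Perm ts := by
  have hpw := pv_flat_pairwise ts hnd
  have hnodup_flat : (pvFlat ts).Nodup :=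
    hpw.imp (fun h heq => absurd (heq ▸ h) (lt_irrefl _))
  have hts_nd : ts.Nodup := hnd.of_map
  rw [List.perm_ext_iff_of_nodup hnodup_flat hts_nd]
  intro x
  simp only [pvFlat, pvBlock, List.mem_flatMap, List.mem_map]
  constructor
  · rintro ⟨r, _, j, _, n, hn, rfl⟩
    exact (pv_mem_N ts r j n).mp hn
  · intro hx
    exact ⟨x.1, (pv_mem_R ts x.1).mpr ⟨x, hx, rfl⟩,
      x.2.1, (pv_mem_J ts x.1 x.2.1).mpr ⟨x, hx, rfl, rfl⟩,
      x.2.2, (pv_mem_N ts x.1 x.2.1 x.2.2).mpr hx, rfl⟩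

-- B's single sort computes the flattened canonical output
lemma pv_sorted_eq_flat (ts : List (Int × String × String))
    (hnd : (ts.map (fun t => (t.2.2, t.2.1))).Nodup) :
    PySem.List.sorted ts pvKey = pvFlat ts := by
  apply PySem.List.sorted_eq_of_perm_of_pairwise_lt
  · exact pv_flat_perm ts hnd
  · exact pv_flat_pairwise ts hnd

-- grouping a flattened job-block recovers the block
lemma pv_groupJobs_flat (r : Int) (gs : List (String × List String))
    (hne : ∀ g ∈ gs, g.2 ≠ [])
    (hpw : gs.Pairwise (fun a b => a.1 ≠ b.1)) :
    pvGroupJobs (gs.flatMap (fun g => g.2.map (fun n => (r, g.1, n)))) = gs := by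
  induction gs with
  | nil => simp [pvGroupJobs]
  | cons g gs ih =>
    obtain ⟨hg1, hgs⟩ := List.pairwise_cons.mp hpw
    obtain ⟨n, ns, hns⟩ := List.exists_cons_of_ne_nil (hne g List.mem_cons_self)
    have htw_rest : (gs.flatMap (fun g => g.2.map (fun n => (r, g.1, n)))).takeWhile
        (fun u => u.2.1 == g.1) = [] := by
      cases gs with
      | nil => rfl
      | cons g' gs' =>
        obtain ⟨n', ns', hns'⟩ := List.exists_cons_of_ne_nil (hne g' (by simp))
        rw [List.flatMap_cons, hns', List.map_cons, List.cons_append, List.takeWhile_cons]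
        have hfalse : (((r, g'.1, n') : Int × String × String).2.1 == g.1) = false := by
          simpa using (hg1 g' (by simp)).symm
        rw [hfalse]
        simp
    have hdw_rest : (gs.flatMap (fun g => g.2.map (fun n => (r, g.1, n)))).dropWhile
        (fun u => u.2.1 == g.1) = gs.flatMap (fun g => g.2.map (fun n => (r, g.1, n))) := by
      cases gs with
      | nil => rfl
      | cons g' gs' =>
        obtain ⟨n', ns', hns'⟩ := List.exists_cons_of_ne_nil (hne g' (by simp))
        rw [List.flatMap_cons, hns', List.map_cons, List.cons_append, List.dropWhile_cons]
        have hfalse : (((r, g'.1, n') : Int × String × String).2.1 == g.1) = false := by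
          simpa using (hg1 g' (by simp)).symm
        rw [hfalse]
        simp
    have hpos : ∀ x ∈ g.2.map (fun n => ((r, g.1, n) : Int × String × String)),
        (fun u : Int × String × String => u.2.1 == g.1) x = true := by
      intro x hx
      obtain ⟨m, _, rfl⟩ := List.mem_map.mp hx
      simp
    rw [List.flatMap_cons, hns, List.map_cons, List.cons_append, pvGroupJobs]
    dsimp only
    have hassoc : ((r, g.1, n) : Int × String × String) ::
        (ns.map (fun n => (r, g.1, n)) ++ gs.flatMap (fun g => g.2.map (fun n => (r, g.1, n))))
        = g.2.map (fun n => (r, g.1, n))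
          ++ gs.flatMap (fun g => g.2.map (fun n => (r, g.1, n))) := by
      rw [hns]; simp
    rw [hassoc, List.takeWhile_append_of_pos hpos, List.dropWhile_append_of_pos hpos,
      htw_rest, hdw_rest, List.append_nil, List.map_map]
    rw [ih (fun g hg => hne g (List.mem_cons_of_mem _ hg)) hgs]
    simp [Function.comp_def]

-- grouping a flattened rank-block recovers the blocks, grouping each one's jobs
lemma pv_groupRanks_flat (gs : List (Int × List (Int × String × String)))
    (hne : ∀ g ∈ gs, g.2 ≠ [])
    (hkey : ∀ g ∈ gs, ∀ t ∈ g.2, t.1 = g.1)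
    (hpw : gs.Pairwise (fun a b => a.1 ≠ b.1)) :
    pvGroupRanks (gs.flatMap (fun g => g.2)) = gs.map (fun g => (g.1, pvGroupJobs g.2)) := by
  induction gs with
  | nil => simp [pvGroupRanks]
  | cons g gs ih =>
    obtain ⟨hg1, hgs⟩ := List.pairwise_cons.mp hpw
    obtain ⟨t0, trest, hts⟩ := List.exists_cons_of_ne_nil (hne g List.mem_cons_self)
    have ht0 : t0.1 = g.1 := hkey g List.mem_cons_self t0 (by rw [hts]; exact List.mem_cons_self)
    have htw_rest : (gs.flatMap (fun g => g.2)).takeWhile (fun u => u.1 == g.1) = [] := by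
      cases gs with
      | nil => rfl
      | cons g' gs' =>
        obtain ⟨t0', trest', hts'⟩ := List.exists_cons_of_ne_nil (hne g' (by simp))
        have ht0' : t0'.1 = g'.1 :=
          hkey g' (by simp) t0' (by rw [hts']; exact List.mem_cons_self)
        rw [List.flatMap_cons, hts', List.cons_append, List.takeWhile_cons]
        have hfalse : (t0'.1 == g.1) = false := by
          rw [ht0']; simpa using (hg1 g' (by simp)).symm
        rw [hfalse]
        simp
    have hdw_rest : (gs.flatMap (fun g => g.2)).dropWhile (fun u => u.1 == g.1)
        = gs.flatMap (fun g => g.2) := by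
      cases gs with
      | nil => rfl
      | cons g' gs' =>
        obtain ⟨t0', trest', hts'⟩ := List.exists_cons_of_ne_nil (hne g' (by simp))
        have ht0' : t0'.1 = g'.1 :=
          hkey g' (by simp) t0' (by rw [hts']; exact List.mem_cons_self)
        rw [List.flatMap_cons, hts', List.cons_append, List.dropWhile_cons]
        have hfalse : (t0'.1 == g.1) = false := by
          rw [ht0']; simpa using (hg1 g' (by simp)).symm
        rw [hfalse]
        simp
    have hpos : ∀ x ∈ g.2, (fun u : Int × String × String => u.1 == g.1) x = true := by
      intro x hx
      simp [hkey g List.mem_cons_self x hx]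
    rw [List.flatMap_cons, hts, List.cons_append, pvGroupRanks, ht0, ← List.cons_append, ← hts]
    rw [List.takeWhile_append_of_pos hpos, List.dropWhile_append_of_pos hpos,
      htw_rest, hdw_rest, List.append_nil]
    rw [ih (fun g hg => hne g (List.mem_cons_of_mem _ hg))
      (fun g hg t ht => hkey g (List.mem_cons_of_mem _ hg) t ht) hgs]
    simp

-- B computes the canonical nested output
lemma pv_B_canon (db1 : List (String × List (String × Int))) (hpre : Pre_by_skill db1) :
    by_skill_alt db1 = pvCanon (pvTs db1) := by
  unfold by_skill_alt
  rw [show (db1.flatMap (fun p => p.2.map (fun q => (q.2, q.1, p.1)))) = pvTs db1 from rfl]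
  set ts := pvTs db1 with hts
  rw [pv_sorted_eq_flat ts (pv_key_nodup db1 hpre)]
  have hgs : pvFlat ts = ((pvR ts).map (fun r => (r, pvBlock ts r))).flatMap (fun g => g.2) := by
    simp [pvFlat, List.flatMap_def, List.map_map, Function.comp_def]
  rw [hgs, pv_groupRanks_flat]
  · rw [List.map_map]
    refine List.map_congr_left (fun r hr => ?_)
    simp only [Function.comp_apply]
    have hblk : pvBlock ts r
        = ((pvJ ts r).map (fun j => (j, pvN ts r j))).flatMap
            (fun g => g.2.map (fun n => (r, g.1, n))) := by
      simp [pvBlock, List.flatMap_def, List.map_map, Function.comp_def]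
    rw [hblk, pv_groupJobs_flat]
    · intro g hg
      obtain ⟨j, hj, rfl⟩ := List.mem_map.mp hg
      exact pv_N_ne_nil ts r j hj
    · rw [List.pairwise_map]
      exact (pv_J_pairwise ts r).imp (fun h => ne_of_lt h)
  · intro g hg
    obtain ⟨r, hr, rfl⟩ := List.mem_map.mp hg
    exact pv_block_ne_nil ts r hr
  · intro g hg t ht
    obtain ⟨r, hr, rfl⟩ := List.mem_map.mp hg
    obtain ⟨j, _, n, _, rfl⟩ := pv_mem_block ts r t ht
    rfl
  · rw [List.pairwise_map]
    exact (pv_R_pairwise ts).imp (fun h => (ne_of_lt h).symm)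

-- ===== VERDICT (by name: the statement is the Claim_ definition above) =====
theorem by_skill_spec : Claim_equal_by_skill := by
  intro db1 _ hpre
  unfold Spec_by_skill
  rw [pv_A_canon, pv_B_canon db1 hpre]
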